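-- pv_equiv track=rewrite | github.com/m-zakeri/CodA | test_visitor.py | checkCoverWithSidetour
-- ===== SOURCE A (Python) =====
-- def checkCoverWithSidetour(primepath, exepath):
--     exe_length = len(exepath)
--     prime_length = len(primepath)
--     for i in range(exe_length - prime_length + 1):
--         j = 0
--         k = 0
--         if exepath[i + j] == primepath[k]:
--             j += 1
--             k += 1
--             while k < prime_length and i + j < exe_length:
--                 if exepath[i + j] == primepath[k]:  # tour directly
--                     j += 1
--                     k += 1
--                 elif primepath[k - 1] in exepath[i + j:]:  # tour with sidetrip
--                     j += exepath[i + j:].index(primepath[k - 1]) + 1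
--                 else:
--                     break
--             if k == prime_length:
--                 return True
--     return False
-- ===== SOURCE B (Python) =====
-- def checkCoverWithSidetour(primepath, exepath):
--     n = len(exepath)
--     m = len(primepath)
--     first = primepath[0]
--     limit = n - m + 1
--     # The greedy advance step is monotone in the current position, so the
--     # chain started at the EARLIEST admissible start dominates every other
--     # start: one left-to-right pass over exepath decides coverage.
--     q = 0
--     while q < limit and exepath[q] != first:
--         q += 1
--     if q >= limit:
--         return False
--     for k in range(1, m):
--         v = primepath[k - 1]
--         w = primepath[k]
--         while q + 1 < n and not (exepath[q] == v and exepath[q + 1] == w):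
--             q += 1
--         if q + 1 >= n:
--             return False
--         q += 1
--     return True
-- ===== Notes on version B (the rewrite author's own statement) =====
-- stated objective: alternative
-- what changed: A retries a greedy jump-to-next-occurrence match from every possible start index, re-slicing and re-scanning exepath at each step; B proves the greedy advance step monotone in position, so it runs ONE chain from the earliest admissible start as a single left-to-right two-index pass with no slicing, no occurrence search and no outer restart loop.
import Mathlib
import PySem

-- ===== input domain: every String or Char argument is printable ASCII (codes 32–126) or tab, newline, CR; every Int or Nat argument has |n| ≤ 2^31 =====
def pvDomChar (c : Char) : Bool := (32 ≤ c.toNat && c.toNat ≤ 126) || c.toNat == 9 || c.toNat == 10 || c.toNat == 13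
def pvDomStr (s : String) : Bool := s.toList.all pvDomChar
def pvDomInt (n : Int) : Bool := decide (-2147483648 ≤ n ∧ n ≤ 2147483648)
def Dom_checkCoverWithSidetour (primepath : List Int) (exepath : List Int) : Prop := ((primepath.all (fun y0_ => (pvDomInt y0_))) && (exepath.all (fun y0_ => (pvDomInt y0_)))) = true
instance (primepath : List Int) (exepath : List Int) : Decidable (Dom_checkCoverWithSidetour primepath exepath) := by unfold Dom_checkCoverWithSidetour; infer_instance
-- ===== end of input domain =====

-- B replaces A's try-every-start outer loop and per-step slice/index rescans by a SINGLE
-- left-to-right pass: the greedy advance step is monotone in the current position, so the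
-- chain from the earliest admissible start dominates every other start (proved below).

-- ===== PORT A =====
-- the inner `while k < prime_length and i + j < exe_length` loop of A; state (j, k).
-- j strictly increases each iteration and is bounded by exe_length, so fuel = exe_length + 1
-- is always enough; the fuel is only the recursion bound, never reached before the guard fails.
def loopA (primepath : List Int) (exepath : List Int) (i : Int) : Nat → Int → Int → Int
  | 0, _, k => k
  | fuel + 1, j, k =>
    if k < (primepath.length : Int) ∧ i + j < (exepath.length : Int) then
      if PySem.List.pyGetD exepath (i + j) 0 = PySem.List.pyGetD primepath k 0 then
        -- tour directly
        loopA primepath exepath i fuel (j + 1) (k + 1)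
      else if (PySem.List.slice exepath (some (i + j)) none).contains
                (PySem.List.pyGetD primepath (k - 1) 0) then
        -- tour with sidetrip: j += exepath[i+j:].index(primepath[k-1]) + 1
        loopA primepath exepath i fuel
          (j + (((PySem.List.index? (PySem.List.slice exepath (some (i + j)) none)
                    (PySem.List.pyGetD primepath (k - 1) 0)).getD 0 : Nat) : Int) + 1) k
      else k  -- break
    else k

def checkCoverWithSidetour (primepath : List Int) (exepath : List Int) : Bool :=
  (PySem.List.pyRange 0 ((exepath.length : Int) - (primepath.length : Int) + 1) 1).any (fun i =>
    if PySem.List.pyGetD exepath (i + 0) 0 = PySem.List.pyGetD primepath 0 0 then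
      decide (loopA primepath exepath i (exepath.length + 1) 1 1 = (primepath.length : Int))
    else false)

-- ===== PORT B =====
-- `while q < limit and exepath[q] != first: q += 1` — find the earliest admissible start.
-- q increases by 1 while q < limit ≤ len(exepath), so fuel = len(exepath) + 1 suffices.
def findStart (exepath : List Int) (first limit : Int) : Nat → Int → Int
  | 0, q => q
  | fuel + 1, q =>
    if q < limit ∧ PySem.List.pyGetD exepath q 0 ≠ first then
      findStart exepath first limit fuel (q + 1)
    else q

-- `while q + 1 < n and not (exepath[q] == v and exepath[q+1] == w): q += 1` — one stage's scan.
def scanB (exepath : List Int) (v w : Int) : Nat → Int → Int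
  | 0, q => q
  | fuel + 1, q =>
    if q + 1 < (exepath.length : Int) ∧
        ¬(PySem.List.pyGetD exepath q 0 = v ∧ PySem.List.pyGetD exepath (q + 1) 0 = w) then
      scanB exepath v w fuel (q + 1)
    else q

-- `for k in range(1, m): … if q + 1 >= n: return False … ; return True`; c = m - k stages left.
def chainB (primepath : List Int) (exepath : List Int) : Nat → Int → Int → Bool
  | 0, _, _ => true
  | c + 1, k, q =>
    let v := PySem.List.pyGetD primepath (k - 1) 0
    let w := PySem.List.pyGetD primepath k 0
    let q' := scanB exepath v w (exepath.length + 1) q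
    if (exepath.length : Int) ≤ q' + 1 then false
    else chainB primepath exepath c (k + 1) (q' + 1)

def checkCoverWithSidetour_alt (primepath : List Int) (exepath : List Int) : Bool :=
  let n : Int := (exepath.length : Int)
  let m : Int := (primepath.length : Int)
  let first := PySem.List.pyGetD primepath 0 0
  let limit := n - m + 1
  let q := findStart exepath first limit (exepath.length + 1) 0
  if limit ≤ q then false
  else chainB primepath exepath (primepath.length - 1) 1 q

-- ===== PRECONDITION & SPEC =====
-- A (and B) evaluates primepath[0], so an empty primepath raises IndexError.
def Pre_checkCoverWithSidetour (primepath : List Int) (exepath : List Int) : Prop :=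
  primepath ≠ []
instance (primepath : List Int) (exepath : List Int) : Decidable (Pre_checkCoverWithSidetour primepath exepath) := by unfold Pre_checkCoverWithSidetour; infer_instance

def pvWitness_checkCoverWithSidetour : List Int × List Int := ([1, 2], [1, 3, 1, 2])

def Spec_checkCoverWithSidetour (primepath : List Int) (exepath : List Int) (out : Bool) : Prop := out = checkCoverWithSidetour_alt primepath exepath
instance (primepath : List Int) (exepath : List Int) (out : Bool) : Decidable (Spec_checkCoverWithSidetour primepath exepath out) := by unfold Spec_checkCoverWithSidetour; infer_instance

-- ===== CLAIM (what is proved, stated in full; the proofs are below) =====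
def Claim_equal_checkCoverWithSidetour : Prop := ∀ (primepath : List Int) (exepath : List Int), Dom_checkCoverWithSidetour primepath exepath → Pre_checkCoverWithSidetour primepath exepath → Spec_checkCoverWithSidetour primepath exepath (checkCoverWithSidetour primepath exepath)

-- ===== LEMMAS AND PROOFS =====

-- `seek B c q`: the first position ≥ q at which the loop guard `q < B ∧ c q` fails.
-- Both B's while-loops and (after a simulation argument) A's occurrence-jumping are seeks.
def seek (B : Int) (c : Int → Bool) (q : Int) : Int :=
  if h : q < B ∧ c q = true then seek B c (q + 1) else q
termination_by (B - q).toNat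
decreasing_by omega

theorem seek_ge (B : Int) (c : Int → Bool) (q : Int) : q ≤ seek B c q := by
  fun_induction seek with
  | case1 q h ih => omega
  | case2 q h => omega

theorem seek_stop (B : Int) (c : Int → Bool) (q : Int) :
    ¬(seek B c q < B ∧ c (seek B c q) = true) := by
  fun_induction seek with
  | case1 q h ih => exact ih
  | case2 q h => exact h

theorem seek_between (B : Int) (c : Int → Bool) (q : Int) :
    ∀ x, q ≤ x → x < seek B c q → x < B ∧ c x = true := by
  fun_induction seek with
  | case1 q h ih =>
    intro x h1 h2
    rcases eq_or_lt_of_le h1 with rfl | hlt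
    · exact h
    · exact ih x (by omega) h2
  | case2 q h => intro x h1 h2; omega

theorem seek_unfold_pos (B : Int) (c : Int → Bool) (q : Int) (h : q < B ∧ c q = true) :
    seek B c q = seek B c (q + 1) := by
  rw [seek]; exact dif_pos h

theorem seek_unfold_neg (B : Int) (c : Int → Bool) (q : Int) (h : ¬(q < B ∧ c q = true)) :
    seek B c q = q := by
  rw [seek]; exact dif_neg h

theorem seek_skip (B : Int) (c : Int → Bool) :
    ∀ (d : Nat) (a b : Int), (b - a).toNat ≤ d → a ≤ b →
      (∀ x, a ≤ x → x < b → x < B ∧ c x = true) → seek B c a = seek B c b := by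
  intro d
  induction d with
  | zero => intro a b hd hab _; have : a = b := by omega
            rw [this]
  | succ d ih =>
    intro a b hd hab hcond
    rcases eq_or_lt_of_le hab with rfl | hlt
    · rfl
    · rw [seek_unfold_pos B c a (hcond a le_rfl hlt)]
      exact ih (a + 1) b (by omega) (by omega) (fun x hx1 hx2 => hcond x (by omega) hx2)

theorem seek_mono (B : Int) (c : Int → Bool) (p' p : Int) (h : p' ≤ p) :
    seek B c p' ≤ seek B c p := by
  by_cases hc : seek B c p' < p
  · exact le_trans (le_of_lt hc) (seek_ge B c p)
  · push Not at hc
    have hskip : seek B c p = seek B c (seek B c p') := by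
      apply seek_skip B c (seek B c p' - p).toNat p (seek B c p') (by omega) hc
      intro x hx1 hx2
      exact seek_between B c p' x (by omega) hx2
    rw [hskip, seek_unfold_neg B c _ (seek_stop B c p')]

-- the scan condition of stage k and the start-search condition, as seek conditions
def cS (primepath exepath : List Int) (k : Int) : Int → Bool := fun x =>
  !(decide (PySem.List.pyGetD exepath x 0 = PySem.List.pyGetD primepath (k - 1) 0 ∧
            PySem.List.pyGetD exepath (x + 1) 0 = PySem.List.pyGetD primepath k 0))
def cF (exepath : List Int) (first : Int) : Int → Bool := fun x =>
  !(decide (PySem.List.pyGetD exepath x 0 = first))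

theorem scanB_eq_seek (pp exepath : List Int) (k : Int) :
    ∀ (fuel : Nat) (q : Int), (exepath.length : Int) ≤ q + fuel →
      scanB exepath (PySem.List.pyGetD pp (k - 1) 0) (PySem.List.pyGetD pp k 0) fuel q
        = seek ((exepath.length : Int) - 1) (cS pp exepath k) q := by
  intro fuel
  induction fuel with
  | zero =>
    intro q hq
    rw [scanB, seek_unfold_neg]
    unfold cS
    simp only [Nat.cast_zero, add_zero] at hq
    omega
  | succ fuel ih =>
    intro q hq
    rw [scanB]
    by_cases h : q + 1 < (exepath.length : Int) ∧
        ¬(PySem.List.pyGetD exepath q 0 = PySem.List.pyGetD pp (k - 1) 0 ∧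
          PySem.List.pyGetD exepath (q + 1) 0 = PySem.List.pyGetD pp k 0)
    · rw [if_pos h, ih (q + 1) (by push_cast at hq ⊢; omega),
        seek_unfold_pos _ _ q (by unfold cS; simp only [Bool.not_eq_eq_eq_not, Bool.not_true,
          decide_eq_false_iff_not]; exact ⟨by omega, h.2⟩)]
    · rw [if_neg h, seek_unfold_neg]
      unfold cS
      intro hcon
      apply h
      rcases hcon with ⟨h1, h2⟩
      simp only [Bool.not_eq_eq_eq_not, Bool.not_true, decide_eq_false_iff_not] at h2
      exact ⟨by omega, h2⟩

theorem findStart_eq_seek (exepath : List Int) (first limit : Int) :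
    ∀ (fuel : Nat) (q : Int), limit ≤ q + fuel →
      findStart exepath first limit fuel q = seek limit (cF exepath first) q := by
  intro fuel
  induction fuel with
  | zero =>
    intro q hq
    rw [findStart, seek_unfold_neg]
    unfold cF
    simp only [Nat.cast_zero, add_zero] at hq
    simp only [Bool.not_eq_eq_eq_not, Bool.not_true, decide_eq_false_iff_not]
    omega
  | succ fuel ih =>
    intro q hq
    rw [findStart]
    by_cases h : q < limit ∧ PySem.List.pyGetD exepath q 0 ≠ first
    · rw [if_pos h, ih (q + 1) (by push_cast at hq ⊢; omega),
        seek_unfold_pos _ _ q (by unfold cF; simp only [Bool.not_eq_eq_eq_not, Bool.not_true,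
          decide_eq_false_iff_not]; exact h)]
    · rw [if_neg h, seek_unfold_neg]
      unfold cF
      simp only [Bool.not_eq_eq_eq_not, Bool.not_true, decide_eq_false_iff_not]
      exact h

-- chainS: chainB with the scans replaced by their seek values (fuel-free reference)
def chainS (primepath : List Int) (exepath : List Int) : Nat → Int → Int → Bool
  | 0, _, _ => true
  | c + 1, k, q =>
    let q' := seek ((exepath.length : Int) - 1) (cS primepath exepath k) q
    if (exepath.length : Int) ≤ q' + 1 then false
    else chainS primepath exepath c (k + 1) (q' + 1)

theorem chainB_eq_chainS (pp exepath : List Int) :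
    ∀ (c : Nat) (k q : Int), -1 ≤ q →
      chainB pp exepath c k q = chainS pp exepath c k q := by
  intro c
  induction c with
  | zero => intro k q _; rfl
  | succ c ih =>
    intro k q hq
    simp only [chainB, chainS]
    rw [scanB_eq_seek pp exepath k (exepath.length + 1) q (by push_cast; omega)]
    have hge : q ≤ seek ((exepath.length : Int) - 1) (cS pp exepath k) q := seek_ge _ _ _
    by_cases hn : (exepath.length : Int) ≤ seek ((exepath.length : Int) - 1) (cS pp exepath k) q + 1
    · rw [if_pos hn, if_pos hn]
    · rw [if_neg hn, if_neg hn]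
      exact ih (k + 1) _ (by omega)

theorem chainS_mono (pp exepath : List Int) :
    ∀ (c : Nat) (k p' p : Int), p' ≤ p → chainS pp exepath c k p = true →
      chainS pp exepath c k p' = true := by
  intro c
  induction c with
  | zero => intro k p' p _ _; rfl
  | succ c ih =>
    intro k p' p h ht
    simp only [chainS] at ht ⊢
    have hm : seek ((exepath.length : Int) - 1) (cS pp exepath k) p'
        ≤ seek ((exepath.length : Int) - 1) (cS pp exepath k) p := seek_mono _ _ _ _ h
    by_cases hn : (exepath.length : Int) ≤ seek ((exepath.length : Int) - 1) (cS pp exepath k) p + 1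
    · rw [if_pos hn] at ht; exact absurd ht (by simp)
    · rw [if_neg hn] at ht
      rw [if_neg (by omega)]
      exact ih (k + 1) _ _ (by omega) ht

-- fuel-free reference for A's inner loop, on the absolute position pos = i + j
def loopASpec (primepath : List Int) (exepath : List Int) (pos k : Int) : Int :=
  if h : k < (primepath.length : Int) ∧ pos < (exepath.length : Int) then
    if PySem.List.pyGetD exepath pos 0 = PySem.List.pyGetD primepath k 0 then
      loopASpec primepath exepath (pos + 1) (k + 1)
    else if (PySem.List.slice exepath (some pos) none).contains
              (PySem.List.pyGetD primepath (k - 1) 0) then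
      loopASpec primepath exepath
        (pos + (((PySem.List.index? (PySem.List.slice exepath (some pos) none)
                    (PySem.List.pyGetD primepath (k - 1) 0)).getD 0 : Nat) : Int) + 1) k
    else k
  else k
termination_by ((exepath.length : Int) + 1 - pos).toNat
decreasing_by all_goals omega

theorem loopA_eq_spec (pp exepath : List Int) (i : Int) :
    ∀ (fuel : Nat) (j k : Int), (exepath.length : Int) ≤ i + j + fuel →
      loopA pp exepath i fuel j k = loopASpec pp exepath (i + j) k := by
  intro fuel
  induction fuel with
  | zero =>
    intro j k h
    rw [loopA, loopASpec, dif_neg]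
    push_cast at h
    omega
  | succ fuel ih =>
    intro j k h
    rw [loopA, loopASpec]
    by_cases hg : k < (pp.length : Int) ∧ i + j < (exepath.length : Int)
    · rw [if_pos hg, dif_pos hg]
      by_cases hd : PySem.List.pyGetD exepath (i + j) 0 = PySem.List.pyGetD pp k 0
      · rw [if_pos hd, if_pos hd, ih (j + 1) (k + 1) (by push_cast at h ⊢; omega),
          show i + (j + 1) = i + j + 1 from by ring]
      · rw [if_neg hd, if_neg hd]
        by_cases hc : (PySem.List.slice exepath (some (i + j)) none).contains
            (PySem.List.pyGetD pp (k - 1) 0) = true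
        · rw [if_pos hc, if_pos hc]
          have ht : (0 : Int) ≤ (((PySem.List.index? (PySem.List.slice exepath (some (i + j)) none)
              (PySem.List.pyGetD pp (k - 1) 0)).getD 0 : Nat) : Int) := Int.natCast_nonneg _
          rw [ih _ k (by push_cast at h ⊢; omega),
            show i + (j + (((PySem.List.index? (PySem.List.slice exepath (some (i + j)) none)
              (PySem.List.pyGetD pp (k - 1) 0)).getD 0 : Nat) : Int) + 1)
              = i + j + (((PySem.List.index? (PySem.List.slice exepath (some (i + j)) none)
              (PySem.List.pyGetD pp (k - 1) 0)).getD 0 : Nat) : Int) + 1 from by ring]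
        · rw [if_neg hc, if_neg hc]
    · rw [if_neg hg, dif_neg hg]

-- helper: an in-range element, read through pyGetD, lies in the tail dropped at a ≤ x
theorem getD_mem_drop (exe : List Int) (a x : Int) (h0 : 0 ≤ a) (hax : a ≤ x)
    (hxn : x < (exe.length : Int)) :
    PySem.List.pyGetD exe x 0 ∈ exe.drop a.toNat := by
  rw [PySem.List.pyGetD_eq_getElem exe (i := x) 0 (by omega) hxn]
  have hx : x.toNat - a.toNat < (exe.drop a.toNat).length := by
    simp only [List.length_drop]; omega
  have heq : exe[x.toNat]'(by omega) = (exe.drop a.toNat)[x.toNat - a.toNat]'hx := by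
    rw [List.getElem_drop]
    congr 1
    omega
  rw [heq]
  exact List.getElem_mem hx

-- one stage of A's inner loop equals one seek (the simulation of occurrence-jumps by the scan)
theorem stageA (pp exepath : List Int) (k : Int) (hk : k < (pp.length : Int)) :
    ∀ (d : Nat) (p : Int), ((exepath.length : Int) - p).toNat ≤ d →
      0 ≤ p → p < (exepath.length : Int) →
      PySem.List.pyGetD exepath p 0 = PySem.List.pyGetD pp (k - 1) 0 →
      loopASpec pp exepath (p + 1) k =
        (if (exepath.length : Int) ≤ seek ((exepath.length : Int) - 1) (cS pp exepath k) p + 1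
         then k
         else loopASpec pp exepath (seek ((exepath.length : Int) - 1) (cS pp exepath k) p + 2)
                (k + 1)) := by
  intro d
  induction d with
  | zero => intro p hd _ hpn _; omega
  | succ d ih =>
    intro p hd hp0 hpn hinv
    by_cases hp1 : p + 1 < (exepath.length : Int)
    · rw [loopASpec, dif_pos ⟨hk, hp1⟩]
      by_cases hw : PySem.List.pyGetD exepath (p + 1) 0 = PySem.List.pyGetD pp k 0
      · -- direct match: the seek stops immediately at p
        rw [if_pos hw]
        have hcs : cS pp exepath k p = false := by
          unfold cS
          simp only [Bool.not_eq_eq_eq_not, Bool.not_false, decide_eq_true_eq]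
          exact ⟨hinv, hw⟩
        rw [seek_unfold_neg _ _ p (by simp [hcs]), if_neg (by omega),
          show p + 1 + 1 = p + 2 from by ring]
      · rw [if_neg hw]
        have hcs : cS pp exepath k p = true := by
          unfold cS
          simp only [Bool.not_eq_eq_eq_not, Bool.not_true, decide_eq_false_iff_not]
          intro hcon
          exact hw hcon.2
        have hstep : seek ((exepath.length : Int) - 1) (cS pp exepath k) p
            = seek ((exepath.length : Int) - 1) (cS pp exepath k) (p + 1) :=
          seek_unfold_pos _ _ p ⟨by omega, hcs⟩
        rw [PySem.List.slice_from (xs := exepath) (a := p + 1) (by omega)]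
        by_cases hmem : PySem.List.pyGetD pp (k - 1) 0 ∈ exepath.drop (p + 1).toNat
        · -- sidetrip: jump to the first occurrence r = p + 1 + t; the seek walks there
          rw [if_pos (by simpa using hmem)]
          obtain ⟨t, hidx⟩ := Option.isSome_iff_exists.mp
            ((PySem.List.index?_isSome_iff _ _).mpr hmem)
          obtain ⟨htlt, htv, htmin⟩ := PySem.List.getElem_of_index?_eq_some hidx
          have hdlen : (exepath.drop (p + 1).toNat).length = exepath.length - (p + 1).toNat := by
            simp [List.length_drop]
          have hrn : p + 1 + (t : Int) < (exepath.length : Int) := by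
            rw [hdlen] at htlt; push_cast; omega
          have hrv : PySem.List.pyGetD exepath (p + 1 + (t : Int)) 0
              = PySem.List.pyGetD pp (k - 1) 0 := by
            rw [PySem.List.pyGetD_eq_getElem exepath (i := p + 1 + (t : Int)) 0 (by omega) hrn]
            have hnat : (p + 1 + (t : Int)).toNat = (p + 1).toNat + t := by omega
            have heq : exepath[(p + 1 + (t : Int)).toNat]'(by omega)
                = (exepath.drop (p + 1).toNat)[t]'htlt := by
              rw [List.getElem_drop]
              congr 1
            rw [heq]
            exact htv
          have hskip : seek ((exepath.length : Int) - 1) (cS pp exepath k) (p + 1)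
              = seek ((exepath.length : Int) - 1) (cS pp exepath k) (p + 1 + (t : Int)) := by
            apply seek_skip _ _ t (p + 1) (p + 1 + (t : Int)) (by omega) (by omega)
            intro x hx1 hx2
            constructor
            · omega
            · unfold cS
              simp only [Bool.not_eq_eq_eq_not, Bool.not_true, decide_eq_false_iff_not]
              intro hcon
              have hjx : x.toNat - (p + 1).toNat < t := by omega
              apply htmin (x.toNat - (p + 1).toNat) hjx
              have heq : (exepath.drop (p + 1).toNat)[x.toNat - (p + 1).toNat]'(by omega)
                  = exepath[x.toNat]'(by omega) := by
                rw [List.getElem_drop]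
                congr 1
                omega
              rw [heq, ← PySem.List.pyGetD_eq_getElem exepath (i := x) 0 (by omega) (by omega)]
              exact hcon.1
          have hmeas : ((exepath.length : Int) - (p + 1 + (t : Int))).toNat ≤ d := by omega
          have hihres := ih (p + 1 + (t : Int)) hmeas (by omega) hrn hrv
          rw [hidx, Option.getD_some,
            show p + 1 + (t : Int) + 1 = (p + 1 + (t : Int)) + 1 from rfl,
            hihres, hstep, hskip]
        · -- no further occurrence: A breaks; the seek runs to the end, so B fails too
          rw [if_neg (by simpa using hmem)]
          have hskip : seek ((exepath.length : Int) - 1) (cS pp exepath k) (p + 1)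
              = seek ((exepath.length : Int) - 1) (cS pp exepath k)
                  ((exepath.length : Int) - 1) := by
            apply seek_skip _ _ (exepath.length) (p + 1) ((exepath.length : Int) - 1)
              (by omega) (by omega)
            intro x hx1 hx2
            refine ⟨hx2, ?_⟩
            unfold cS
            simp only [Bool.not_eq_eq_eq_not, Bool.not_true, decide_eq_false_iff_not]
            intro hcon
            apply hmem
            rw [← hcon.1]
            exact getD_mem_drop exepath (p + 1) x (by omega) hx1 (by omega)
          rw [hstep, hskip, seek_unfold_neg _ _ _ (by omega), if_pos (by omega)]
    · -- p is the last index: the guard fails at once and the seek stops at p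
      rw [seek_unfold_neg _ _ p (by omega), if_pos (by omega), loopASpec, dif_neg (by omega)]

theorem loopASpec_eq_chainS (pp exepath : List Int) :
    ∀ (c : Nat) (k : Int), k = (pp.length : Int) - c → 1 ≤ k →
      ∀ (p : Int), 0 ≤ p → p < (exepath.length : Int) →
        PySem.List.pyGetD exepath p 0 = PySem.List.pyGetD pp (k - 1) 0 →
        decide (loopASpec pp exepath (p + 1) k = (pp.length : Int)) = chainS pp exepath c k p := by
  intro c
  induction c with
  | zero =>
    intro k hkc hk1 p _ _ _
    have hkm : k = (pp.length : Int) := by push_cast at hkc; omega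
    rw [loopASpec, dif_neg (by omega)]
    simp [chainS, hkm]
  | succ c ih =>
    intro k hkc hk1 p hp0 hpn hinv
    have hk : k < (pp.length : Int) := by push_cast at hkc; omega
    rw [stageA pp exepath k hk ((exepath.length : Int) - p).toNat p le_rfl hp0 hpn hinv]
    simp only [chainS]
    by_cases hn : (exepath.length : Int)
        ≤ seek ((exepath.length : Int) - 1) (cS pp exepath k) p + 1
    · rw [if_pos hn, if_pos hn, decide_eq_false (by omega)]
    · rw [if_neg hn, if_neg hn]
      have hq'p : p ≤ seek ((exepath.length : Int) - 1) (cS pp exepath k) p := seek_ge _ _ _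
      have hstop := seek_stop ((exepath.length : Int) - 1) (cS pp exepath k) p
      have hcs : cS pp exepath k (seek ((exepath.length : Int) - 1) (cS pp exepath k) p)
          = false := by
        rcases Bool.eq_false_or_eq_true
            (cS pp exepath k (seek ((exepath.length : Int) - 1) (cS pp exepath k) p)) with h | h
        · exact absurd ⟨by omega, h⟩ hstop
        · exact h
      unfold cS at hcs
      simp only [Bool.not_eq_eq_eq_not, Bool.not_false, decide_eq_true_eq] at hcs
      have hinv' : PySem.List.pyGetD exepath
            (seek ((exepath.length : Int) - 1) (cS pp exepath k) p + 1) 0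
          = PySem.List.pyGetD pp (k + 1 - 1) 0 := by
        rw [show k + 1 - 1 = k from by ring]
        exact hcs.2
      rw [show seek ((exepath.length : Int) - 1) (cS pp exepath k) p + 2
          = (seek ((exepath.length : Int) - 1) (cS pp exepath k) p + 1) + 1 from by ring]
      exact ih (k + 1) (by push_cast at hkc ⊢; omega) (by omega) _ (by omega) (by omega) hinv'

theorem pv_any_congr {α : Type} (l : List α) (f g : α → Bool)
    (h : ∀ x ∈ l, f x = g x) : l.any f = l.any g := by
  induction l with
  | nil => rfl
  | cons x xs ih =>
    simp only [List.any_cons, h x (by simp), ih (fun y hy => h y (by simp [hy]))]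

-- ===== VERDICT (by name: the statement is the Claim_ definition above) =====
theorem checkCoverWithSidetour_spec : Claim_equal_checkCoverWithSidetour := by
  intro pp exe _ hpre
  have hm1 : 1 ≤ (pp.length : Int) := by
    have : 0 < pp.length := List.length_pos_iff.mpr hpre
    omega
  unfold Spec_checkCoverWithSidetour
  simp only [checkCoverWithSidetour, checkCoverWithSidetour_alt]
  rw [findStart_eq_seek exe (PySem.List.pyGetD pp 0 0)
    ((exe.length : Int) - (pp.length : Int) + 1) (exe.length + 1) 0 (by push_cast; omega)]
  set limit := (exe.length : Int) - (pp.length : Int) + 1 with hlimdef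
  set first := PySem.List.pyGetD pp 0 0 with hfirstdef
  set r := seek limit (cF exe first) 0 with hrdef
  have hr0 : (0 : Int) ≤ r := seek_ge _ _ 0
  refine (pv_any_congr (PySem.List.pyRange 0 limit 1) _
      (fun i => if PySem.List.pyGetD exe i 0 = first
        then chainS pp exe (pp.length - 1) 1 i else false) ?_).trans ?_
  · intro i hi
    obtain ⟨hi0, hilim⟩ := (PySem.List.mem_pyRange_one).1 hi
    rw [show i + 0 = i from by ring]
    show _ = if PySem.List.pyGetD exe i 0 = first
      then chainS pp exe (pp.length - 1) 1 i else false
    by_cases hfi : PySem.List.pyGetD exe i 0 = first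
    · rw [if_pos hfi, if_pos hfi,
        loopA_eq_spec pp exe i (exe.length + 1) 1 1 (by push_cast; omega)]
      exact loopASpec_eq_chainS pp exe (pp.length - 1) 1 (by omega) le_rfl i hi0
        (by omega) (by rw [show (1 : Int) - 1 = 0 from by ring]; exact hfi)
    · rw [if_neg hfi, if_neg hfi]
  · by_cases hlim : limit ≤ r
    · rw [if_pos hlim]
      rw [List.any_eq_false]
      intro i hi
      obtain ⟨hi0, hilim⟩ := (PySem.List.mem_pyRange_one).1 hi
      have hcf := (seek_between limit (cF exe first) 0 i hi0 (by omega)).2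
      unfold cF at hcf
      simp only [Bool.not_eq_eq_eq_not, Bool.not_true, decide_eq_false_iff_not] at hcf
      simp [hcf]
    · rw [if_neg hlim]
      push Not at hlim
      have hcfr : PySem.List.pyGetD exe r 0 = first := by
        have hstop := seek_stop limit (cF exe first) 0
        rcases Bool.eq_false_or_eq_true (cF exe first r) with h | h
        · exact absurd ⟨by omega, h⟩ hstop
        · unfold cF at h
          simp only [Bool.not_eq_eq_eq_not, Bool.not_false, decide_eq_true_eq] at h
          exact h
      rw [chainB_eq_chainS pp exe (pp.length - 1) 1 r (by omega)]
      by_cases hB : chainS pp exe (pp.length - 1) 1 r = true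
      · rw [hB]
        apply List.any_eq_true.mpr
        exact ⟨r, (PySem.List.mem_pyRange_one).2 ⟨hr0, by omega⟩, by rw [if_pos hcfr, hB]⟩
      · rw [Bool.eq_false_iff.mpr hB, List.any_eq_false]
        intro i hi
        obtain ⟨hi0, hilim⟩ := (PySem.List.mem_pyRange_one).1 hi
        by_cases hfi : PySem.List.pyGetD exe i 0 = first
        · simp only [if_pos hfi]
          by_cases hri : r ≤ i
          · rcases Bool.eq_false_or_eq_true (chainS pp exe (pp.length - 1) 1 i) with h | h
            · exact absurd (chainS_mono pp exe (pp.length - 1) 1 r i hri h) hB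
            · simp [h]
          · have hir : i < r := by omega
            have hcf := (seek_between limit (cF exe first) 0 i hi0 hir).2
            unfold cF at hcf
            simp only [Bool.not_eq_eq_eq_not, Bool.not_true, decide_eq_false_iff_not] at hcf
            exact absurd hfi hcf
        · simp [hfi]
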